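-- pv_equiv track=rewrite | github.com/tathyagarg/rosetta-code | python/rises_and_falls.py | in_sequence
-- ===== SOURCE A (Python) =====
-- def in_sequence(n: int) -> bool:
--     n = str(n)
--     rises, falls = 0, 0
--     for i, char in enumerate(n[:-1]):
--         if int(n[i]) < int(n[i + 1]):
--             rises += 1
--         elif int(n[i]) > int(n[i + 1]):
--             falls += 1
--
--     return rises == falls
-- ===== SOURCE B (Python) =====
-- def in_sequence(n: int) -> bool:
--     def net(s):
--         # net rise/fall balance of s, by divide and conquer:
--         # split in half, add the halves' balances and the boundary pair's sign
--         if len(s) < 2: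
--             return 0
--         m = len(s) // 2
--         return net(s[:m]) + ((s[m - 1] < s[m]) - (s[m - 1] > s[m])) + net(s[m:])
--     return net(str(n)) == 0
-- ===== Notes on version B (the rewrite author's own statement) =====
-- stated objective: alternative
-- what changed: Replaces the left-to-right two-counter if/elif loop with a divide-and-conquer recursion that splits the digit string in half, adds the halves' net rise/fall balances plus the sign of the boundary pair, and tests whether the total balance is zero.
import Mathlib
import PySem

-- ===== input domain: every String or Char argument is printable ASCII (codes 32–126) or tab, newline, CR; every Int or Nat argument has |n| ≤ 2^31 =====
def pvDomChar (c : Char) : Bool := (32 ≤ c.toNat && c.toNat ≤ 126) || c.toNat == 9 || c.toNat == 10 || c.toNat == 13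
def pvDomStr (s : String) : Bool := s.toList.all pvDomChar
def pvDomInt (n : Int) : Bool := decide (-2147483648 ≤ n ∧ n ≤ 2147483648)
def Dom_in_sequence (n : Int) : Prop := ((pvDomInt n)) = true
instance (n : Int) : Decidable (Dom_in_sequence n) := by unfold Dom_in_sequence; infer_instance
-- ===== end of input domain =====

-- B replaces A's left-to-right two-counter if/elif loop with a divide-and-conquer
-- recursion on the digit string (objective: alternative, same cost).

-- ===== PORT A =====
def in_sequence (n : Int) : Bool :=
  let s := PySem.Int.toChars n
  -- n[i] and n[i+1] are always in range inside this loop, so pyGetD with a dummy default is exact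
  let rf := (PySem.List.enumerate (PySem.List.slice s none (some (-1)))).foldl
    (fun (rf : Int × Int) ic =>
      if (PySem.Int.ofChars? [PySem.List.pyGetD s ic.1 ' ']).getD 0 <
         (PySem.Int.ofChars? [PySem.List.pyGetD s (ic.1 + 1) ' ']).getD 0 then (rf.1 + 1, rf.2)
      else if (PySem.Int.ofChars? [PySem.List.pyGetD s ic.1 ' ']).getD 0 >
              (PySem.Int.ofChars? [PySem.List.pyGetD s (ic.1 + 1) ' ']).getD 0 then (rf.1, rf.2 + 1)
      else rf) ((0 : Int), (0 : Int))
  rf.1 == rf.2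

-- ===== PORT B =====
-- (s[m-1] < s[m]) - (s[m-1] > s[m]) as an Int (Python bools subtract as 0/1)
def pvCmp (a b : Char) : Int := (if a < b then (1 : Int) else 0) - (if a > b then (1 : Int) else 0)

-- Source B's helper net: divide-and-conquer net rise/fall balance.
-- s[m-1] and s[m] are nonnegative in-range indices here, so List.getD with a dummy default is exact.
def pvNet (s : List Char) : Int :=
  if _h : s.length < 2 then 0
  else
    let m := s.length / 2
    pvNet (s.take m) + pvCmp (s.getD (m - 1) ' ') (s.getD m ' ') + pvNet (s.drop m)
termination_by s.length
decreasing_by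
  · simp only [List.length_take]; omega
  · simp only [List.length_drop]; omega

def in_sequence_alt (n : Int) : Bool :=
  pvNet (PySem.Int.toChars n) == 0

-- ===== PRECONDITION & SPEC =====
-- A raises ValueError on every negative n (int of the sign character '-'); Pre_ keeps exactly
-- the inputs on which A returns.
def Pre_in_sequence (n : Int) : Prop := 0 ≤ n
instance (n : Int) : Decidable (Pre_in_sequence n) := by unfold Pre_in_sequence; infer_instance
def pvWitness_in_sequence : Int := 121

def Spec_in_sequence (n : Int) (out : Bool) : Prop := out = in_sequence_alt n
instance (n : Int) (out : Bool) : Decidable (Spec_in_sequence n out) := by unfold Spec_in_sequence; infer_instance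

-- ===== CLAIM (what is proved, stated in full; the proofs are below) =====
def Claim_equal_in_sequence : Prop := ∀ (n : Int), Dom_in_sequence n → Pre_in_sequence n → Spec_in_sequence n (in_sequence n)

-- ===== LEMMAS AND PROOFS =====

-- the ten decimal digit characters
def pvDigits : List Char := ['0','1','2','3','4','5','6','7','8','9']

-- A's loop body as a function of an adjacent pair, and a net-accumulator body
def pvFA (rf : Int × Int) (p : Char × Char) : Int × Int :=
  if (PySem.Int.ofChars? [p.1]).getD 0 < (PySem.Int.ofChars? [p.2]).getD 0 then (rf.1 + 1, rf.2)
  else if (PySem.Int.ofChars? [p.1]).getD 0 > (PySem.Int.ofChars? [p.2]).getD 0 then (rf.1, rf.2 + 1)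
  else rf

def pvFB (acc : Int) (ab : Char × Char) : Int := acc + pvCmp ab.1 ab.2

-- the left-to-right net balance over adjacent pairs (the common reference point)
def pvSum : List Char → Int
  | a :: b :: t => pvCmp a b + pvSum (b :: t)
  | _ => 0

lemma pv_digitChar_mem : ∀ r : Nat, r < 10 → Nat.digitChar r ∈ pvDigits := by decide

lemma pv_toDigitsCore_mem : ∀ (fuel n : Nat) (acc : List Char),
    (∀ c ∈ acc, c ∈ pvDigits) → ∀ c ∈ Nat.toDigitsCore 10 fuel n acc, c ∈ pvDigits := by
  intro fuel
  induction fuel with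
  | zero => intro n acc hacc c hc; exact hacc c hc
  | succ f ih =>
      intro n acc hacc c hc
      rw [Nat.toDigitsCore] at hc
      have hcons : ∀ d ∈ (n % 10).digitChar :: acc, d ∈ pvDigits := by
        intro d hd
        rcases List.mem_cons.mp hd with hd | hd
        · exact hd ▸ pv_digitChar_mem _ (Nat.mod_lt _ (by norm_num))
        · exact hacc d hd
      split at hc
      · exact hcons c hc
      · exact ih _ _ hcons c hc

lemma pv_toDigitsCore_len : ∀ (fuel n : Nat) (acc : List Char),
    acc.length ≤ (Nat.toDigitsCore 10 fuel n acc).length := by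
  intro fuel
  induction fuel with
  | zero => intro n acc; simp [Nat.toDigitsCore]
  | succ f ih =>
      intro n acc
      rw [Nat.toDigitsCore]
      split
      · simp
      · calc acc.length ≤ ((n % 10).digitChar :: acc).length := by simp
          _ ≤ _ := ih _ _

lemma pv_toDigitsCore_len_pos (fuel n : Nat) (acc : List Char) :
    acc.length + 1 ≤ (Nat.toDigitsCore 10 (fuel + 1) n acc).length := by
  rw [Nat.toDigitsCore]
  split
  · simp
  · calc acc.length + 1 = ((n % 10).digitChar :: acc).length := by simp
      _ ≤ _ := pv_toDigitsCore_len _ _ _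

lemma pv_toChars_mem (n : Int) (h : 0 ≤ n) : ∀ c ∈ PySem.Int.toChars n, c ∈ pvDigits := by
  simp only [PySem.Int.toChars, if_neg (not_lt.mpr h)]
  exact pv_toDigitsCore_mem _ _ [] (by simp)

lemma pv_toChars_ne_nil (n : Int) (h : 0 ≤ n) : PySem.Int.toChars n ≠ [] := by
  simp only [PySem.Int.toChars, if_neg (not_lt.mpr h)]
  intro hnil
  have := pv_toDigitsCore_len_pos n.toNat n.toNat []
  rw [show Nat.toDigitsCore 10 (n.toNat + 1) n.toNat [] = Nat.toDigits 10 n.toNat from rfl,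
    hnil] at this
  simp at this

lemma pv_dval : ∀ c ∈ pvDigits, (PySem.Int.ofChars? [c]).getD 0 = (c.toNat : Int) - 48 := by
  intro c hc
  fin_cases hc <;> decide

lemma pv_char_lt (a b : Char) : a < b ↔ a.toNat < b.toNat := by
  rw [Char.lt_def, UInt32.lt_iff_toNat_lt]; rfl

lemma pv_cmp_lt : ∀ a ∈ pvDigits, ∀ b ∈ pvDigits,
    ((PySem.Int.ofChars? [a]).getD 0 < (PySem.Int.ofChars? [b]).getD 0 ↔ a < b) := by
  intro a ha b hb
  rw [pv_dval a ha, pv_dval b hb, pv_char_lt]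
  omega

-- the two-counter fold and the net fold are related by rises − falls = net
lemma pv_net_eq : ∀ (P : List (Char × Char)), (∀ p ∈ P, p.1 ∈ pvDigits ∧ p.2 ∈ pvDigits) →
    ∀ r f : Int, (P.foldl pvFA (r, f)).1 - (P.foldl pvFA (r, f)).2 = P.foldl pvFB (r - f) := by
  intro P
  induction P with
  | nil => intro _ r f; simp
  | cons p t ih =>
      intro hp r f
      have h1 := (hp p (by simp)).1
      have h2 := (hp p (by simp)).2
      have ht : ∀ q ∈ t, q.1 ∈ pvDigits ∧ q.2 ∈ pvDigits := fun q hq => hp q (by simp [hq])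
      simp only [List.foldl_cons]
      by_cases hlt : p.1 < p.2
      · rw [show pvFA (r, f) p = (r + 1, f) by
            simp [pvFA, (pv_cmp_lt _ h1 _ h2).mpr hlt]]
        rw [show pvFB (r - f) p = r + 1 - f by
            simp only [pvFB, pvCmp, if_pos hlt, if_neg (asymm hlt)]; ring]
        exact ih ht (r + 1) f
      · by_cases hgt : p.2 < p.1
        · rw [show pvFA (r, f) p = (r, f + 1) by
              simp [pvFA, (pv_cmp_lt _ h2 _ h1).mpr hgt,
                not_lt.mpr (le_of_lt ((pv_cmp_lt _ h2 _ h1).mpr hgt))]]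
          rw [show pvFB (r - f) p = r - (f + 1) by
              simp only [pvFB, pvCmp, if_neg hlt, if_pos hgt]; ring]
          exact ih ht r (f + 1)
        · rw [show pvFA (r, f) p = (r, f) by
              simp [pvFA, (pv_cmp_lt _ h1 _ h2).not.mpr hlt, (pv_cmp_lt _ h2 _ h1).not.mpr hgt]]
          rw [show pvFB (r - f) p = r - f by simp [pvFB, pvCmp, hlt, hgt]]
          exact ih ht r f

lemma pv_slice_init {cs : List Char} (h : cs ≠ []) :
    PySem.List.slice cs none (some (-1)) = cs.take (cs.length - 1) := by
  have hlen : 1 ≤ cs.length := List.length_pos_iff.mpr h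
  simp only [PySem.List.slice, PySem.List.clampIdx]
  split_ifs with h1 h2
  all_goals first | (exfalso; omega) | (congr 1; omega)

-- the pvFB fold over adjacent pairs computes pvSum
lemma pv_foldl_fb : ∀ (s : List Char) (acc : Int),
    (s.zip s.tail).foldl pvFB acc = acc + pvSum s := by
  intro s
  induction s with
  | nil => intro acc; simp [pvSum]
  | cons a t ih =>
      intro acc
      cases t with
      | nil => simp [pvSum]
      | cons b t' =>
          simp only [List.tail_cons] at ih ⊢
          simp only [List.zip_cons_cons, List.foldl_cons]
          rw [ih]
          show pvFB acc (a, b) + pvSum (b :: t') = acc + pvSum (a :: b :: t')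
          simp only [pvFB, pvSum]
          ring

-- pvSum splits at any interior boundary
lemma pv_sum_append : ∀ (u v : List Char) (hu : u ≠ []) (hv : v ≠ []),
    pvSum (u ++ v) = pvSum u + pvCmp (u.getLast hu) (v.head hv) + pvSum v := by
  intro u
  induction u with
  | nil => intro v hu hv; exact absurd rfl hu
  | cons a t ih =>
      intro v hu hv
      cases t with
      | nil =>
          cases v with
          | nil => exact absurd rfl hv
          | cons c v' => simp [pvSum]
      | cons b t' =>
          have ht : (b :: t') ≠ [] := by simp
          have : ((a :: b :: t') ++ v) = a :: ((b :: t') ++ v) := by simp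
          rw [this]
          have hcons : a :: ((b :: t') ++ v) = a :: b :: (t' ++ v) := by simp
          rw [hcons]
          show pvCmp a b + pvSum (b :: (t' ++ v)) = _
          have hbt : (b :: (t' ++ v)) = (b :: t') ++ v := by simp
          rw [hbt, ih v ht hv]
          have hlast : (a :: b :: t').getLast hu = (b :: t').getLast ht := by
            simp [List.getLast_cons]
          rw [hlast]
          show _ = (pvCmp a b + pvSum (b :: t')) + _ + _
          ring

-- the divide-and-conquer net equals the left-to-right net
lemma pv_net_sum : ∀ (N : Nat) (s : List Char), s.length ≤ N → pvNet s = pvSum s := by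
  intro N
  induction N with
  | zero =>
      intro s hs
      have : s = [] := List.length_eq_zero_iff.mp (Nat.le_zero.mp hs)
      subst this
      simp [pvNet, pvSum]
  | succ N ih =>
      intro s hs
      rw [pvNet]
      split_ifs with h2
      · match s, h2 with
        | [], _ => simp [pvSum]
        | [a], _ => simp [pvSum]
      · have hlen : 2 ≤ s.length := by omega
        set m := s.length / 2 with hm
        have hm1 : 1 ≤ m := by omega
        have hmlt : m < s.length := by omega
        have htk : (s.take m).length = m := by simp [List.length_take]; omega
        have hdk : (s.drop m).length = s.length - m := by simp
        have hu : s.take m ≠ [] := by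
          intro h; rw [h] at htk; simp at htk; omega
        have hv : s.drop m ≠ [] := by
          intro h; rw [h] at hdk; simp at hdk; omega
        have hsplit : s = s.take m ++ s.drop m := (List.take_append_drop m s).symm
        have hlast : (s.take m).getLast hu = s.getD (m - 1) ' ' := by
          rw [List.getLast_eq_getElem, List.getD_eq_getElem s ' ' (by omega)]
          simp only [List.getElem_take, htk]
        have hhead : (s.drop m).head hv = s.getD m ' ' := by
          rw [List.head_eq_getElem, List.getD_eq_getElem s ' ' hmlt]
          simp
        calc pvNet (s.take m) + pvCmp (s.getD (m - 1) ' ') (s.getD m ' ') + pvNet (s.drop m)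
            = pvSum (s.take m) + pvCmp ((s.take m).getLast hu) ((s.drop m).head hv)
              + pvSum (s.drop m) := by
              rw [ih _ (by omega), ih _ (by omega), hlast, hhead]
          _ = pvSum (s.take m ++ s.drop m) := (pv_sum_append _ _ hu hv).symm
          _ = pvSum s := by rw [← hsplit]

-- ===== VERDICT (by name: the statement is the Claim_ definition above) =====
theorem in_sequence_spec : Claim_equal_in_sequence := by
  intro n _ hpre
  unfold Spec_in_sequence in_sequence in_sequence_alt
  dsimp only
  set cs := PySem.Int.toChars n with hcs
  have hne : cs ≠ [] := pv_toChars_ne_nil n hpre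
  have hdig := pv_toChars_mem n hpre
  have hlen : 1 ≤ cs.length := List.length_pos_iff.mpr hne
  set P := cs.zip cs.tail with hP
  have hPlen : P.length = cs.length - 1 := by
    simp [hP, List.length_zip, List.length_tail]
  have hPdig : ∀ p ∈ P, p.1 ∈ pvDigits ∧ p.2 ∈ pvDigits := by
    intro p hp
    obtain ⟨a, b⟩ := p
    have hab := List.of_mem_zip hp
    exact ⟨hdig _ hab.1, hdig _ (List.mem_of_mem_tail hab.2)⟩
  -- rewrite A's loop into a fold over the adjacent-pair list P
  rw [pv_slice_init hne, PySem.List.enumerate_eq_map_pyRange _ ' ', List.foldl_map]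
  have hlen' : PySem.List.len (cs.take (cs.length - 1)) = PySem.List.len P := by
    simp [PySem.List.len, hPlen, List.length_take]
  rw [hlen']
  have hbody : ∀ (rf : Int × Int), ∀ j ∈ PySem.List.pyRange 0 (PySem.List.len P) 1,
      (fun (rf : Int × Int) (ic : Int × Char) =>
        if (PySem.Int.ofChars? [PySem.List.pyGetD cs ic.1 ' ']).getD 0 <
           (PySem.Int.ofChars? [PySem.List.pyGetD cs (ic.1 + 1) ' ']).getD 0 then (rf.1 + 1, rf.2)
        else if (PySem.Int.ofChars? [PySem.List.pyGetD cs ic.1 ' ']).getD 0 >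
                (PySem.Int.ofChars? [PySem.List.pyGetD cs (ic.1 + 1) ' ']).getD 0 then (rf.1, rf.2 + 1)
        else rf) rf (j, PySem.List.pyGetD (cs.take (cs.length - 1)) j ' ')
      = pvFA rf (PySem.List.pyGetD P j (' ', ' ')) := by
    intro rf j hj
    have hj' := (PySem.List.mem_pyRange_one).mp hj
    simp only [PySem.List.len] at hj'
    have hjlen : j.toNat < P.length := by omega
    have hcs1 : j.toNat < cs.length := by omega
    have hcs2 : j.toNat + 1 < cs.length := by omega
    have hg1 : PySem.List.pyGetD cs j ' ' = cs[j.toNat]'hcs1 :=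
      PySem.List.pyGetD_eq_getElem cs ' ' hj'.1 (by omega)
    have hg2 : PySem.List.pyGetD cs (j + 1) ' ' = cs[j.toNat + 1]'hcs2 := by
      rw [PySem.List.pyGetD_eq_getElem cs ' ' (by omega) (by omega)]
      congr 1
      omega
    have hgP : PySem.List.pyGetD P j (' ', ' ') = P[j.toNat]'hjlen :=
      PySem.List.pyGetD_eq_getElem P (' ', ' ') hj'.1 (by omega)
    have hPj : P[j.toNat]'hjlen = (cs[j.toNat]'hcs1, cs[j.toNat + 1]'hcs2) := by
      simp only [hP, List.getElem_zip, List.getElem_tail]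
    simp only [hg1, hg2, hgP, hPj, pvFA]
  rw [PySem.List.foldl_congr_mem _ _ _ _ (fun acc x hx => hbody acc x hx)]
  rw [PySem.List.foldl_pyRange_zero_pyGetD P (' ', ' ') pvFA ((0 : Int), (0 : Int))]
  -- compare the two-counter result with the divide-and-conquer net
  have hnet := pv_net_eq P hPdig 0 0
  norm_num at hnet
  have hfb : P.foldl pvFB 0 = pvSum cs := by
    rw [hP, pv_foldl_fb cs 0]; ring
  have hdc : pvNet cs = pvSum cs := pv_net_sum cs.length cs le_rfl
  rw [Bool.eq_iff_iff]
  simp only [beq_iff_eq]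
  show (List.foldl pvFA (0, 0) P).1 = (List.foldl pvFA (0, 0) P).2 ↔ pvNet cs = 0
  rw [hdc, ← hfb]
  omega
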